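-- pv_equiv track=rewrite | github.com/samucarpi/Tirocinio | analyst/analyst.py | countRAFFood
-- ===== SOURCE A (Python) =====
-- def countRAFFood(lines):
--     count=0
--     flag=False
--     for line in lines:
--         if line.startswith("10.0") and not flag:
--             flag=True
--         if flag:
--             count += 1
--     count -= 1
--     return count
-- ===== SOURCE B (Python) =====
-- def countRAFFood(lines):
--     lines = list(lines)
--     matches = [i for i, line in enumerate(lines) if line.startswith("10.0")]
--     if not matches:
--         return -1
--     return len(lines) - matches[0] - 1
-- ===== Notes on version B (the rewrite author's own statement) =====
-- stated objective: simpler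
-- what changed: Replaces A's flag-driven running counter with collecting the indices of '10.0'-prefixed lines and computing the answer by the closed form len(lines) - first_index - 1.
import Mathlib
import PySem

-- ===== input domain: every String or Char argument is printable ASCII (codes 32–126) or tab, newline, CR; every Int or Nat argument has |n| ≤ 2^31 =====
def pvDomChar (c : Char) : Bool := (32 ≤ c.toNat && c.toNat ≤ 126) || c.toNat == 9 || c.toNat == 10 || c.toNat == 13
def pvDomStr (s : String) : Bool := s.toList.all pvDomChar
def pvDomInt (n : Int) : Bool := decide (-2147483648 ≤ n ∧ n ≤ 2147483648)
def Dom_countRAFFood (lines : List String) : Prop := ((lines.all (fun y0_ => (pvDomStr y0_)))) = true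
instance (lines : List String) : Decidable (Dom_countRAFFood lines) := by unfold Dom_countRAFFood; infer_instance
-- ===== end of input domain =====

-- B replaces A's flag-driven running counter with index collection plus a closed form (same O(n) cost; simpler).


-- ===== PORT A =====
def countRAFFoodStep (st : Int × Bool) (line : String) : Int × Bool :=
  let flag := if PySem.Str.startswith line "10.0" && !st.2 then true else st.2
  let count := if flag then st.1 + 1 else st.1
  (count, flag)

def countRAFFood (lines : List String) : Int :=
  (lines.foldl countRAFFoodStep (0, false)).1 - 1

-- ===== PORT B =====
def countRAFFood_alt (lines : List String) : Int :=
  let hits := ((PySem.List.enumerate lines 0).filter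
      (fun p => PySem.Str.startswith p.2 "10.0")).map Prod.fst
  match hits with
  | [] => -1
  | i :: _ => (lines.length : Int) - i - 1

-- ===== PRECONDITION & SPEC =====
def Spec_countRAFFood (lines : List String) (out : Int) : Prop := out = countRAFFood_alt lines
instance (lines : List String) (out : Int) : Decidable (Spec_countRAFFood lines out) := by unfold Spec_countRAFFood; infer_instance

-- ===== CLAIM (what is proved, stated in full; the proofs are below) =====
def Claim_equal_countRAFFood : Prop := ∀ (lines : List String), Dom_countRAFFood lines → Spec_countRAFFood lines (countRAFFood lines)

-- ===== LEMMAS AND PROOFS =====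
theorem countRAFFood_flagged (xs : List String) (c : Int) :
    xs.foldl countRAFFoodStep (c, true) = (c + xs.length, true) := by
  induction xs generalizing c with
  | nil => simp
  | cons x xs ih =>
    rw [List.foldl_cons]
    have hs : countRAFFoodStep (c, true) x = (c + 1, true) := by
      simp only [countRAFFoodStep, Bool.not_true, Bool.and_false, Bool.false_eq_true,
        if_false, if_true]
    rw [hs, ih]
    simp only [List.length_cons, Prod.mk.injEq, and_true]
    push_cast
    ring

theorem countRAFFood_main (xs : List String) (s : Int) :
    (xs.foldl countRAFFoodStep (0, false)).1 - 1 =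
      (match ((PySem.List.enumerate xs s).filter
          (fun p => PySem.Str.startswith p.2 "10.0")).map Prod.fst with
        | [] => (-1 : Int)
        | i :: _ => s + xs.length - i - 1) := by
  induction xs generalizing s with
  | nil => rfl
  | cons x xs ih =>
    rw [PySem.List.enumerate_cons, List.foldl_cons, List.filter_cons]
    by_cases h : PySem.Str.startswith x "10.0" = true
    · have hs : countRAFFoodStep (0, false) x = (0 + 1, true) := by
        simp only [countRAFFoodStep, h, Bool.not_false, Bool.and_true, if_true]
      rw [hs, countRAFFood_flagged]
      simp only [h, reduceIte, List.map_cons, List.length_cons]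
      push_cast
      ring_nf
    · have hs : countRAFFoodStep (0, false) x = (0, false) := by
        simp only [countRAFFoodStep, h, Bool.false_and, Bool.false_eq_true, if_false]
      simp only [h, Bool.false_eq_true, reduceIte, List.length_cons]
      rw [hs, ih (s + 1)]
      have hsh : s + 1 + (xs.length : Int) = s + ((xs.length : Int) + 1) := by ring
      push_cast
      rw [hsh]

-- ===== VERDICT (by name: the statement is the Claim_ definition above) =====
theorem countRAFFood_spec : Claim_equal_countRAFFood := by
  intro lines _
  unfold Spec_countRAFFood countRAFFood countRAFFood_alt
  have h := countRAFFood_main lines 0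
  simp only [zero_add] at h
  rw [h]
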